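-- pv_equiv track=rewrite | github.com/javaknight1/arcane | arcane/prompts/roadmap_prompt_builder.py | _format_non_technical_focus_areas
-- ===== SOURCE A (Python) =====
-- def _format_non_technical_focus_areas(roadmap_aspects: list) -> str:
--     """Extract and format non-technical focus areas."""
--     if not roadmap_aspects or roadmap_aspects == ['technical-only']:
--         return "None - Technical implementation focus only"
--
--     non_technical_aspects = [aspect for aspect in roadmap_aspects if aspect != 'technical-only']
--
--     if not non_technical_aspects:
--         return "None - Technical implementation focus only"
--
--     # Group aspects by category for better readability
--     business_aspects = []
--     operational_aspects = []
--
--     business_focused = ['business-strategy', 'marketing-sales', 'finance-accounting', 'product-management']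
--     operational_focused = ['legal-compliance', 'operations', 'customer-support', 'hr-team', 'qa-testing', 'risk-management']
--
--     for aspect in non_technical_aspects:
--         if aspect in business_focused:
--             business_aspects.append(aspect)
--         elif aspect in operational_focused:
--             operational_aspects.append(aspect)
--
--     result_parts = []
--     if business_aspects:
--         result_parts.append(f"Business: {', '.join(business_aspects)}")
--     if operational_aspects:
--         result_parts.append(f"Operational: {', '.join(operational_aspects)}")
--
--     return "; ".join(result_parts) if result_parts else "None specified"
-- ===== SOURCE B (Python) =====
-- def _format_non_technical_focus_areas(roadmap_aspects: list) -> str: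
--     """Extract and format non-technical focus areas (categories as data)."""
--     if not roadmap_aspects or roadmap_aspects == ['technical-only']:
--         return "None - Technical implementation focus only"
--
--     non_technical_aspects = [a for a in roadmap_aspects if a != 'technical-only']
--     if not non_technical_aspects:
--         return "None - Technical implementation focus only"
--
--     categories = [
--         ("Business", ['business-strategy', 'marketing-sales', 'finance-accounting', 'product-management']),
--         ("Operational", ['legal-compliance', 'operations', 'customer-support', 'hr-team', 'qa-testing', 'risk-management']),
--     ]
--
--     result_parts = []
--     for label, members in categories:
--         matched = [a for a in non_technical_aspects if a in members]
--         if matched: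
--             result_parts.append(f"{label}: {', '.join(matched)}")
--
--     return "; ".join(result_parts) if result_parts else "None specified"
-- ===== Notes on version B (the rewrite author's own statement) =====
-- stated objective: idiomatic
-- what changed: Replaces the hand-written elif grouping loop over aspects with two fixed accumulator lists by a data-driven loop over a (label, members) category table, one order-preserving filter per category.
import Mathlib
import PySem

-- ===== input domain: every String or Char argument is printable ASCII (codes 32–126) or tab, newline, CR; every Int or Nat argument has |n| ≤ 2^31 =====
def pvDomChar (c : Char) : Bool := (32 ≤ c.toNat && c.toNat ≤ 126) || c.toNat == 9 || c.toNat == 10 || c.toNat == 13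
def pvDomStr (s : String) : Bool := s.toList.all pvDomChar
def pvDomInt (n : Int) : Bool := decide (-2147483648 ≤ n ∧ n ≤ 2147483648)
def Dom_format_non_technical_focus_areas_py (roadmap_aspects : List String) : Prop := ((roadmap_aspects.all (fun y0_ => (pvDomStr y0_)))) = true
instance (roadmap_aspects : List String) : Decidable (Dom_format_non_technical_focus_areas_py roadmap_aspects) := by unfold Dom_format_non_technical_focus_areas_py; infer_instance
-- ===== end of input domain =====

-- B replaces A's hand-written elif grouping loop (two fixed accumulators) by a data-driven
-- loop over a (label, members) category table with one order-preserving filter per category.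


-- ===== PORT A =====
def pyBusinessFocused : List String :=
  ["business-strategy", "marketing-sales", "finance-accounting", "product-management"]

def pyOperationalFocused : List String :=
  ["legal-compliance", "operations", "customer-support", "hr-team", "qa-testing", "risk-management"]

-- the `for aspect in non_technical_aspects:` loop with its two accumulators
def pyGroupLoop : List String → List String × List String → List String × List String
  | [], acc => acc
  | a :: rest, (bus, op) =>
    if a ∈ pyBusinessFocused then pyGroupLoop rest (bus ++ [a], op)
    else if a ∈ pyOperationalFocused then pyGroupLoop rest (bus, op ++ [a])
    else pyGroupLoop rest (bus, op)

def format_non_technical_focus_areas_py (roadmap_aspects : List String) : String :=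
  if roadmap_aspects = [] ∨ roadmap_aspects = ["technical-only"] then
    "None - Technical implementation focus only"
  else
    let non_technical_aspects := roadmap_aspects.filter (fun a => a ≠ "technical-only")
    if non_technical_aspects = [] then
      "None - Technical implementation focus only"
    else
      let grouped := pyGroupLoop non_technical_aspects ([], [])
      let result_parts :=
        (if grouped.1 ≠ [] then ["Business: " ++ PySem.Str.join ", " grouped.1] else []) ++
        (if grouped.2 ≠ [] then ["Operational: " ++ PySem.Str.join ", " grouped.2] else [])
      if result_parts ≠ [] then PySem.Str.join "; " result_parts else "None specified"

-- ===== PORT B =====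
def altCategories : List (String × List String) :=
  [("Business", ["business-strategy", "marketing-sales", "finance-accounting", "product-management"]),
   ("Operational", ["legal-compliance", "operations", "customer-support", "hr-team", "qa-testing", "risk-management"])]

def format_non_technical_focus_areas_py_alt (roadmap_aspects : List String) : String :=
  if roadmap_aspects = [] ∨ roadmap_aspects = ["technical-only"] then
    "None - Technical implementation focus only"
  else
    let non_technical_aspects := roadmap_aspects.filter (fun a => a ≠ "technical-only")
    if non_technical_aspects = [] then
      "None - Technical implementation focus only"
    else
      let result_parts := altCategories.foldl (fun acc cat =>
        let matched := non_technical_aspects.filter (fun a => a ∈ cat.2)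
        if matched ≠ [] then acc ++ [cat.1 ++ ": " ++ PySem.Str.join ", " matched] else acc) []
      if result_parts ≠ [] then PySem.Str.join "; " result_parts else "None specified"

-- ===== PRECONDITION & SPEC =====
def Spec_format_non_technical_focus_areas_py (roadmap_aspects : List String) (out : String) : Prop := out = format_non_technical_focus_areas_py_alt roadmap_aspects
instance (roadmap_aspects : List String) (out : String) : Decidable (Spec_format_non_technical_focus_areas_py roadmap_aspects out) := by unfold Spec_format_non_technical_focus_areas_py; infer_instance

-- ===== CLAIM (what is proved, stated in full; the proofs are below) =====
def Claim_equal_format_non_technical_focus_areas_py : Prop := ∀ (roadmap_aspects : List String), Dom_format_non_technical_focus_areas_py roadmap_aspects → Spec_format_non_technical_focus_areas_py roadmap_aspects (format_non_technical_focus_areas_py roadmap_aspects)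

-- ===== LEMMAS AND PROOFS =====

-- the two literal category lists are disjoint, so A's `elif` is an unconditional membership test
theorem py_categories_disjoint (a : String) (h : a ∈ pyBusinessFocused) : a ∉ pyOperationalFocused := by
  fin_cases h <;> decide

-- A's grouping loop computes the two order-preserving filters that B takes per category
theorem pyGroupLoop_eq_filters (l : List String) (bus op : List String) :
    pyGroupLoop l (bus, op) =
      (bus ++ l.filter (fun a => a ∈ pyBusinessFocused),
       op ++ l.filter (fun a => a ∈ pyOperationalFocused)) := by
  induction l generalizing bus op with
  | nil => simp [pyGroupLoop]
  | cons a rest ih =>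
    by_cases hb : a ∈ pyBusinessFocused
    · have ho := py_categories_disjoint a hb
      simp [pyGroupLoop, hb, ho, ih]
    · by_cases ho : a ∈ pyOperationalFocused
      · simp [pyGroupLoop, hb, ho, ih]
      · simp [pyGroupLoop, hb, ho, ih]

-- A's append of the two optional parts equals B's two-step fold accumulation of the same parts
theorem parts_eq (F G : List String) :
    ((if F ≠ [] then ["Business: " ++ PySem.Str.join ", " F] else []) ++
     (if G ≠ [] then ["Operational: " ++ PySem.Str.join ", " G] else []))
    =
    (if G ≠ [] then
       (if F ≠ [] then ["Business" ++ ": " ++ PySem.Str.join ", " F] else []) ++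
         ["Operational" ++ ": " ++ PySem.Str.join ", " G]
     else if F ≠ [] then ["Business" ++ ": " ++ PySem.Str.join ", " F] else []) := by
  have h1 : "Business: " = "Business" ++ ": " := by decide
  have h2 : "Operational: " = "Operational" ++ ": " := by decide
  by_cases hF : F = [] <;> by_cases hG : G = [] <;> simp [hF, hG, h1, h2]

-- ===== VERDICT (by name: the statement is the Claim_ definition above) =====
theorem format_non_technical_focus_areas_py_spec : Claim_equal_format_non_technical_focus_areas_py := by
  intro roadmap_aspects _
  unfold Spec_format_non_technical_focus_areas_py
  unfold format_non_technical_focus_areas_py format_non_technical_focus_areas_py_alt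
  simp only [altCategories, List.foldl, pyGroupLoop_eq_filters, List.nil_append,
    pyBusinessFocused, pyOperationalFocused]
  rw [parts_eq]
  rfl
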